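-- pv_equiv track=rewrite | github.com/comery/Bamsnap-LRS | src/bamsnap_lrs/layout.py | assign_bed_stacks
-- ===== SOURCE A (Python) =====
-- from typing import List, Tuple
--
-- def assign_bed_stacks(feature_spans: List[Tuple[int, int]], min_distance: int = 10, max_stack: int = None) -> List[int]:
--     """
--     Assign stack levels for BED features with distance threshold.
--
--     If two consecutive features are closer than min_distance, they will be placed
--     on different stack levels to avoid visual overlap.
--
--     Args:
--         feature_spans: List of (start, end) tuples for features
--         min_distance: Minimum distance (in bp) between features to allow same stack level
--         max_stack: Maximum number of stack levels (default: len(feature_spans))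
--
--     Returns:
--         List of stack indices for each feature
--     """
--     if not feature_spans:
--         return []
--
--     if max_stack is None:
--         max_stack = len(feature_spans)
--
--     stacks: List[List[Tuple[int, int]]] = [[] for _ in range(max_stack)]
--     res: List[int] = []
--
--     for idx, (s, e) in enumerate(feature_spans):
--         placed = -1
--
--         # Try to find a stack level where this feature can be placed
--         for i in range(max_stack):
--             if not stacks[i]:
--                 # Empty stack, can place here
--                 stacks[i].append((s, e))
--                 placed = i
--                 break
--             else:
--                 # Check if this feature can be placed after the last feature in this stack
--                 last_end = stacks[i][-1][1]
--                 distance = s - last_end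
--
--                 # If features don't overlap and distance is >= min_distance, can place here
--                 if last_end <= s and distance >= min_distance:
--                     stacks[i].append((s, e))
--                     placed = i
--                     break
--                 # If features overlap or too close, try next stack
--
--         # If couldn't place, use the last available stack
--         if placed == -1:
--             placed = min(max_stack - 1, idx)
--             stacks[placed].append((s, e))
--
--         res.append(placed)
--
--     return res
-- ===== SOURCE B (Python) =====
-- from typing import List, Tuple
--
-- # Segment-tree first-fit: each stack is summarised by its last feature's end; a
-- # min-segment-tree over min(max_stack, n) stacks finds the leftmost admissible
-- # stack in O(log n) instead of A's O(max_stack) scan.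
-- # Keys: (0, 0) = empty stack (always admissible), (1, last_end) otherwise;
-- # tuple comparison is lexicographic, so min/<= give exactly first-fit order.
--
-- def _build(cnt):
--     # balanced tree with cnt (>= 1) leaves, all empty
--     if cnt == 1:
--         return ('L', (0, 0))
--     half = cnt // 2
--     l = _build(half)
--     r = _build(cnt - half)
--     return ('N', min(_mn(l), _mn(r)), half, l, r)
--
-- def _mn(t):
--     return t[1]
--
-- def _query(t, thr):
--     # leftmost leaf index whose key <= thr, or None
--     if t[0] == 'L':
--         return 0 if t[1] <= thr else None
--     _, _, lc, l, r = t
--     if _mn(l) <= thr: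
--         return _query(l, thr)
--     j = _query(r, thr)
--     return None if j is None else lc + j
--
-- def _update(t, i, v):
--     if t[0] == 'L':
--         return ('L', v)
--     _, _, lc, l, r = t
--     if i < lc:
--         l = _update(l, i, v)
--     else:
--         r = _update(r, i - lc, v)
--     return ('N', min(_mn(l), _mn(r)), lc, l, r)
--
-- def assign_bed_stacks(feature_spans: List[Tuple[int, int]], min_distance: int = 10, max_stack: int = None) -> List[int]:
--     n = len(feature_spans)
--     if n == 0:
--         return []
--     if max_stack is None:
--         max_stack = n
--     m = min(max_stack, n)  # only the first min(max_stack, n) stacks can ever be touched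
--     gap = max(min_distance, 0)
--     tree = _build(m)
--     res = []
--     for s, e in feature_spans:
--         i = _query(tree, (1, s - gap))
--         if i is None:
--             i = m - 1
--         tree = _update(tree, i, (1, e))
--         res.append(i)
--     return res
-- ===== Notes on version B (the rewrite author's own statement) =====
-- stated objective: faster
-- what changed: Replaces A's per-feature linear scan over all max_stack stacks (each stack kept as a full list of placed spans) by a min-segment-tree over the last-end of the min(max_stack,n) reachable stacks, descending to the leftmost admissible stack in O(log n) with a point update.
import Mathlib
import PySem

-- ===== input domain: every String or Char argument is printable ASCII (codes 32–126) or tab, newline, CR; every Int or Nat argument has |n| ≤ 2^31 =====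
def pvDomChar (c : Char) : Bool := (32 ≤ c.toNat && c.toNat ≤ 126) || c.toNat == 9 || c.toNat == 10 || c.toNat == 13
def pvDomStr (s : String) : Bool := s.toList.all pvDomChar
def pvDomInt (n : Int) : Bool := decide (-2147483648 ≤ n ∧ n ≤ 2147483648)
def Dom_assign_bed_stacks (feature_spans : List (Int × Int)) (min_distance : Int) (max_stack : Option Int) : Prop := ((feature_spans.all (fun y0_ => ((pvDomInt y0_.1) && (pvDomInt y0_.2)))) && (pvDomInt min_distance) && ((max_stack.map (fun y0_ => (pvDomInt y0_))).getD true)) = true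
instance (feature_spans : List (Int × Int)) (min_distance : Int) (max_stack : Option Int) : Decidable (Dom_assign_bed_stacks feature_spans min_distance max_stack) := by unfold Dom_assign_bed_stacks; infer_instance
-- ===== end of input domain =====

-- B replaces A's linear first-fit scan over all stks by a min-segment-tree over
-- the last-end of the min(max_stack, n) reachable stks (leftmost admissible stack
-- found by tree descent); equivalence of the return values is proved under Pre_.

-- ===== PORT A =====
-- Inner loop 'for i in range(max_stack)' reads stks[i] with len(stks) = max_stack,
-- so it is ported as structural recursion over the stks list (same tests, same order).
def pvTryPlaceA (d s e : Int) : List (List (Int × Int)) → Option (Nat × List (List (Int × Int)))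
  | [] => none
  | st :: rest =>
    if st = [] then
      some (0, (st ++ [(s, e)]) :: rest)
    else
      -- last_end = stks[i][-1][1]; st ≠ [] so pyGet? st (-1) is some (getD dummy unreachable)
      let last_end := ((PySem.List.pyGet? st (-1)).getD (0, 0)).2
      if last_end ≤ s && s - last_end ≥ d then
        some (0, (st ++ [(s, e)]) :: rest)
      else
        (pvTryPlaceA d s e rest).map (fun p => (p.1 + 1, st :: p.2))

def pvLoopA (d mstk : Int) : List (Int × Int) → Int → List (List (Int × Int)) → List Int
  | [], _, _ => []
  | (s, e) :: fs, idx, stks =>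
    match pvTryPlaceA d s e stks with
    | some (i, stks') => (i : Int) :: pvLoopA d mstk fs (idx + 1) stks'
    | none =>
      let placed : Int := min (mstk - 1) idx
      -- stks[placed].append((s,e)); pyIdx? = none is Python's IndexError (outside Pre_)
      let stks' :=
        match PySem.List.pyIdx? stks.length placed with
        | some j => stks.modify j (fun st => st ++ [(s, e)])
        | none => stks
      placed :: pvLoopA d mstk fs (idx + 1) stks'

def assign_bed_stacks (feature_spans : List (Int × Int)) (min_distance : Int) (max_stack : Option Int) : List Int :=
  if feature_spans = [] then []
  else
    let mstk : Int := max_stack.getD (feature_spans.length : Int)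
    pvLoopA min_distance mstk feature_spans 0 (List.replicate mstk.toNat [])

-- ===== PORT B =====
-- keys: (0,0) = empty stack, (1,last_end) = occupied; Python compares these 2-tuples
-- lexicographically, which is pvKeyLe.
def pvKeyLe (a b : Int × Int) : Bool := a.1 < b.1 || (a.1 = b.1 && a.2 ≤ b.2)

def pvMinK (a b : Int × Int) : Int × Int := if pvKeyLe a b then a else b

inductive PvSeg where
  | leaf : Int × Int → PvSeg
  | node : Int × Int → Nat → PvSeg → PvSeg → PvSeg
deriving Repr

def pvMn : PvSeg → Int × Int
  | .leaf k => k
  | .node k _ _ _ => k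

def pvBuild : Nat → PvSeg
  | 0 => .leaf (0, 0)   -- Python never calls _build with cnt ≤ 0 under Pre_
  | 1 => .leaf (0, 0)
  | n + 2 =>
    let half := (n + 2) / 2
    let l := pvBuild half
    let r := pvBuild (n + 2 - half)
    .node (pvMinK (pvMn l) (pvMn r)) half l r
decreasing_by
  · exact Nat.div_lt_self (by omega) (by omega)
  · have h1 : 1 ≤ (n + 2) / 2 := (Nat.one_le_div_iff (by omega)).mpr (by omega)
    omega

def pvQuery : PvSeg → (Int × Int) → Option Nat
  | .leaf k, thr => if pvKeyLe k thr then some 0 else none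
  | .node _ lc l r, thr =>
    if pvKeyLe (pvMn l) thr then pvQuery l thr
    else
      match pvQuery r thr with
      | some j => some (lc + j)
      | none => none

def pvUpdate : PvSeg → Nat → (Int × Int) → PvSeg
  | .leaf _, _, v => .leaf v
  | .node _ lc l r, i, v =>
    if i < lc then
      let l' := pvUpdate l i v
      .node (pvMinK (pvMn l') (pvMn r)) lc l' r
    else
      let r' := pvUpdate r (i - lc) v
      .node (pvMinK (pvMn l) (pvMn r')) lc l r'

def pvLoopB (gap : Int) (m : Nat) : List (Int × Int) → PvSeg → List Int
  | [], _ => []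
  | (s, e) :: fs, t =>
    let i := (pvQuery t (1, s - gap)).getD (m - 1)
    (i : Int) :: pvLoopB gap m fs (pvUpdate t i (1, e))

def assign_bed_stacks_alt (feature_spans : List (Int × Int)) (min_distance : Int) (max_stack : Option Int) : List Int :=
  if feature_spans = [] then []
  else
    let n : Int := feature_spans.length
    let mk : Int := max_stack.getD n
    let m : Nat := (min mk n).toNat
    let gap : Int := max min_distance 0
    pvLoopB gap m feature_spans (pvBuild m)

-- ===== PRECONDITION & SPEC =====
-- Pre_ excludes only inputs where A raises: a nonempty feature list with an explicit
-- max_stack ≤ 0 makes A index the empty stks list (IndexError).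
def Pre_assign_bed_stacks (feature_spans : List (Int × Int)) (min_distance : Int) (max_stack : Option Int) : Prop :=
  feature_spans = [] ∨ 1 ≤ max_stack.getD 1
instance (feature_spans : List (Int × Int)) (min_distance : Int) (max_stack : Option Int) : Decidable (Pre_assign_bed_stacks feature_spans min_distance max_stack) := by unfold Pre_assign_bed_stacks; infer_instance

def pvWitness_assign_bed_stacks : (List (Int × Int)) × Int × Option Int := ([(1, 5), (7, 9), (8, 20)], 3, some 2)

def Spec_assign_bed_stacks (feature_spans : List (Int × Int)) (min_distance : Int) (max_stack : Option Int) (out : List Int) : Prop := out = assign_bed_stacks_alt feature_spans min_distance max_stack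
instance (feature_spans : List (Int × Int)) (min_distance : Int) (max_stack : Option Int) (out : List Int) : Decidable (Spec_assign_bed_stacks feature_spans min_distance max_stack out) := by unfold Spec_assign_bed_stacks; infer_instance

-- ===== CLAIM (what is proved, stated in full; the proofs are below) =====
def Claim_equal_assign_bed_stacks : Prop := ∀ (feature_spans : List (Int × Int)) (min_distance : Int) (max_stack : Option Int), Dom_assign_bed_stacks feature_spans min_distance max_stack → Pre_assign_bed_stacks feature_spans min_distance max_stack → Spec_assign_bed_stacks feature_spans min_distance max_stack (assign_bed_stacks feature_spans min_distance max_stack)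

-- ===== LEMMAS AND PROOFS =====

-- key of a stack: (0,0) if empty (admits anything), (1, last_end) otherwise
def pvKeyOf (st : List (Int × Int)) : Int × Int :=
  match st.getLast? with
  | none => (0, 0)
  | some p => (1, p.2)

def pvToList : PvSeg → List (Int × Int)
  | .leaf k => [k]
  | .node _ _ l r => pvToList l ++ pvToList r

def pvWf : PvSeg → Prop
  | .leaf _ => True
  | .node k lc l r => k = pvMinK (pvMn l) (pvMn r) ∧ lc = (pvToList l).length ∧ pvWf l ∧ pvWf r

-- reference model: first-fit over the explicit list of stack keys
def pvLoopC (gap : Int) (m : Nat) : List (Int × Int) → List (Int × Int) → List Int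
  | [], _ => []
  | (s, e) :: fs, keys =>
    let i := (keys.findIdx? (fun k => pvKeyLe k (1, s - gap))).getD (m - 1)
    (i : Int) :: pvLoopC gap m fs (keys.set i (1, e))

theorem pvKeyLe_refl (a : Int × Int) : pvKeyLe a a = true := by
  simp [pvKeyLe]

theorem pvKeyLe_total (a b : Int × Int) : pvKeyLe a b = true ∨ pvKeyLe b a = true := by
  simp [pvKeyLe]; omega

theorem pvKeyLe_trans {a b c : Int × Int} (h1 : pvKeyLe a b = true) (h2 : pvKeyLe b c = true) :
    pvKeyLe a c = true := by
  simp [pvKeyLe] at *; omega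

theorem pvMinK_le_left (a b : Int × Int) : pvKeyLe (pvMinK a b) a = true := by
  unfold pvMinK; split
  · exact pvKeyLe_refl a
  · rcases pvKeyLe_total a b with h | h
    · simp_all
    · exact h

theorem pvMinK_le_right (a b : Int × Int) : pvKeyLe (pvMinK a b) b = true := by
  unfold pvMinK; split
  · assumption
  · exact pvKeyLe_refl b

theorem pvMn_mem (t : PvSeg) (h : pvWf t) : pvMn t ∈ pvToList t := by
  induction t with
  | leaf k => simp [pvToList, pvMn]
  | node k lc l r ihl ihr =>
    obtain ⟨hk, -, hl, hr⟩ := h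
    have hmn : pvMn (PvSeg.node k lc l r) = pvMinK (pvMn l) (pvMn r) := hk
    rw [hmn]
    show pvMinK (pvMn l) (pvMn r) ∈ pvToList l ++ pvToList r
    by_cases hc : pvKeyLe (pvMn l) (pvMn r) = true
    · rw [show pvMinK (pvMn l) (pvMn r) = pvMn l from by unfold pvMinK; rw [if_pos hc]]
      exact List.mem_append_left _ (ihl hl)
    · rw [show pvMinK (pvMn l) (pvMn r) = pvMn r from by unfold pvMinK; rw [if_neg hc]]
      exact List.mem_append_right _ (ihr hr)

theorem pvMn_le (t : PvSeg) (h : pvWf t) : ∀ k ∈ pvToList t, pvKeyLe (pvMn t) k = true := by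
  induction t with
  | leaf k0 => intro k hk; simp [pvToList] at hk; subst hk; exact pvKeyLe_refl _
  | node k0 lc l r ihl ihr =>
    obtain ⟨hk0, -, hl, hr⟩ := h
    intro k hk
    simp only [pvToList, List.mem_append] at hk
    simp only [pvMn, hk0]
    rcases hk with hk | hk
    · exact pvKeyLe_trans (pvMinK_le_left _ _) (ihl hl k hk)
    · exact pvKeyLe_trans (pvMinK_le_right _ _) (ihr hr k hk)

theorem pvQuery_eq (t : PvSeg) (h : pvWf t) (thr : Int × Int) :
    pvQuery t thr = (pvToList t).findIdx? (fun k => pvKeyLe k thr) := by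
  induction t with
  | leaf k => simp [pvQuery, pvToList, List.findIdx?_cons]
  | node k0 lc l r ihl ihr =>
    obtain ⟨hk0, hlc, hl, hr⟩ := h
    simp only [pvQuery, pvToList, List.findIdx?_append]
    by_cases hc : pvKeyLe (pvMn l) thr = true
    · rw [if_pos hc, ihl hl]
      have hsome : (pvToList l).findIdx? (fun k => pvKeyLe k thr) ≠ none := by
        rw [Ne, List.findIdx?_eq_none_iff]
        intro hall
        have := hall _ (pvMn_mem l hl)
        simp [hc] at this
      cases hfi : (pvToList l).findIdx? (fun k => pvKeyLe k thr) with
      | none => exact absurd hfi hsome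
      | some i => simp [Option.or]
    · rw [if_neg hc]
      have hnone : (pvToList l).findIdx? (fun k => pvKeyLe k thr) = none := by
        rw [List.findIdx?_eq_none_iff]
        intro x hx
        by_contra hpx
        simp only [Bool.not_eq_false] at hpx
        exact hc (pvKeyLe_trans (pvMn_le l hl x hx) hpx)
      rw [hnone]
      simp only [Option.none_or]
      rw [ihr hr, hlc]
      cases (pvToList r).findIdx? (fun k => pvKeyLe k thr) with
      | none => rfl
      | some j => simp [Nat.add_comm]

theorem pvToList_update_length (t : PvSeg) (i : Nat) (v : Int × Int) :
    (pvToList (pvUpdate t i v)).length = (pvToList t).length := by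
  induction t generalizing i with
  | leaf k => simp [pvUpdate, pvToList]
  | node k0 lc l r ihl ihr =>
    simp only [pvUpdate]
    split <;> simp [pvToList, ihl, ihr]

theorem pvWf_update (t : PvSeg) (h : pvWf t) (i : Nat) (v : Int × Int) :
    pvWf (pvUpdate t i v) := by
  induction t generalizing i with
  | leaf k => trivial
  | node k0 lc l r ihl ihr =>
    obtain ⟨hk0, hlc, hl, hr⟩ := h
    simp only [pvUpdate]
    split
    · exact ⟨rfl, by rw [pvToList_update_length]; exact hlc, ihl hl _, hr⟩
    · exact ⟨rfl, hlc, hl, ihr hr _⟩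

theorem pvToList_update (t : PvSeg) (h : pvWf t) (i : Nat) (v : Int × Int)
    (hi : i < (pvToList t).length) :
    pvToList (pvUpdate t i v) = (pvToList t).set i v := by
  induction t generalizing i with
  | leaf k =>
    simp only [pvToList, List.length_cons, List.length_nil] at hi
    have hi0 : i = 0 := by omega
    subst hi0
    rfl
  | node k0 lc l r ihl ihr =>
    obtain ⟨hk0, hlc, hl, hr⟩ := h
    simp only [pvToList, List.length_append] at hi
    simp only [pvUpdate]
    split
    · rename_i hilt
      rw [hlc] at hilt
      simp only [pvToList]
      rw [List.set_append, if_pos hilt, ihl hl i hilt]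
    · rename_i hige
      rw [hlc] at hige
      have hge : ¬ i < (pvToList l).length := hige
      have hir : i - (pvToList l).length < (pvToList r).length := by omega
      simp only [pvToList]
      rw [List.set_append, if_neg hge, hlc, ihr hr _ hir]

theorem pvBuild_toList : ∀ n, 1 ≤ n → pvToList (pvBuild n) = List.replicate n ((0 : Int), (0 : Int)) := by
  intro n
  induction n using pvBuild.induct with
  | case1 => omega
  | case2 => intro _; simp [pvBuild, pvToList]
  | case3 n half ihl ihr =>
    intro _
    have h1 : 1 ≤ (n + 2) / 2 := (Nat.one_le_div_iff (by omega)).mpr (by omega)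
    have h2 : (n + 2) / 2 < n + 2 := Nat.div_lt_self (by omega) (by omega)
    rw [show n.succ.succ = n + 2 from rfl]
    rw [pvBuild]
    simp only [pvToList]
    rw [ihl (by omega), ihr (by omega), ← List.replicate_add]
    congr 1
    omega

theorem pvBuild_wf : ∀ n, pvWf (pvBuild n) := by
  intro n
  induction n using pvBuild.induct with
  | case1 => rw [show (0:Nat) = 0 from rfl, pvBuild]; trivial
  | case2 => rw [pvBuild]; trivial
  | case3 n half ihl ihr =>
    have h1 : 1 ≤ (n + 2) / 2 := (Nat.one_le_div_iff (by omega)).mpr (by omega)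
    rw [show n.succ.succ = n + 2 from rfl, pvBuild]
    exact ⟨rfl, by rw [pvBuild_toList _ h1, List.length_replicate], ihl, ihr⟩

-- ===== B = C =====
theorem pvLoopB_eq_pvLoopC (gap : Int) (m : Nat) (hm : 1 ≤ m) :
    ∀ (fs : List (Int × Int)) (t : PvSeg), pvWf t → (pvToList t).length = m →
      pvLoopB gap m fs t = pvLoopC gap m fs (pvToList t) := by
  intro fs
  induction fs with
  | nil => intro t _ _; rfl
  | cons fe fs ih =>
    obtain ⟨s, e⟩ := fe
    intro t hwf hlen
    simp only [pvLoopB, pvLoopC]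
    rw [pvQuery_eq t hwf]
    set F := (pvToList t).findIdx? (fun k => pvKeyLe k (1, s - gap)) with hF
    have hidx : F.getD (m - 1) < (pvToList t).length := by
      cases hFv : F with
      | none => simp; omega
      | some i =>
        have := (List.findIdx?_eq_some_iff_getElem.mp (hF ▸ hFv))
        obtain ⟨hlt, -, -⟩ := this
        simpa using hlt
    congr 1
    rw [ih _ (pvWf_update t hwf _ _) (by rw [pvToList_update_length]; exact hlen)]
    rw [pvToList_update t hwf _ _ hidx]

-- ===== A = C =====
theorem pvKeyOf_append (st : List (Int × Int)) (s e : Int) :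
    pvKeyOf (st ++ [(s, e)]) = (1, e) := by
  simp [pvKeyOf]

theorem pvTryPlaceA_eq (d s e : Int) :
    ∀ stks : List (List (Int × Int)),
      pvTryPlaceA d s e stks =
        ((stks.map pvKeyOf).findIdx? (fun k => pvKeyLe k (1, s - max d 0))).map
          (fun i => (i, stks.modify i (fun st => st ++ [(s, e)]))) := by
  intro stks
  induction stks with
  | nil => rfl
  | cons st rest ih =>
    by_cases hemp : st = []
    · subst hemp
      simp only [pvTryPlaceA, List.map_cons, List.findIdx?_cons]
      have : pvKeyLe (pvKeyOf []) (1, s - max d 0) = true := by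
        simp [pvKeyOf, pvKeyLe]
      rw [if_pos this]
      simp [List.modify_zero_cons]
    · obtain ⟨p0, hlast⟩ : ∃ p0, st.getLast? = some p0 := by
        cases h : st.getLast? with
        | none => exact absurd (List.getLast?_eq_none_iff.mp h) hemp
        | some p0 => exact ⟨p0, rfl⟩
      have hget : PySem.List.pyGet? st (-1) = some p0 := by
        rw [PySem.List.pyGet?_neg_one, hlast]
      simp only [pvTryPlaceA, if_neg hemp, hget, Option.getD_some,
        List.map_cons, List.findIdx?_cons]
      have hcond : (decide (p0.2 ≤ s) && decide (s - p0.2 ≥ d)) =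
          pvKeyLe (pvKeyOf st) (1, s - max d 0) := by
        apply Bool.eq_iff_iff.mpr
        simp [pvKeyOf, hlast, pvKeyLe]
        omega
      rw [← hcond]
      by_cases hc : (decide (p0.2 ≤ s) && decide (s - p0.2 ≥ d)) = true
      · rw [if_pos hc, hc, if_pos rfl]
        simp [List.modify_zero_cons]
      · rw [if_neg hc]
        rw [Bool.not_eq_true] at hc
        rw [hc, if_neg (by simp)]
        rw [ih]
        cases hF : (rest.map pvKeyOf).findIdx? (fun k => pvKeyLe k (1, s - max d 0)) with
        | none => rfl
        | some i => simp [List.modify_succ_cons]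

theorem pvFindIdx?_take {α : Type} (p : α → Bool) (l : List α) (i m : Nat)
    (hf : l.findIdx? p = some i) (him : i < m) :
    (l.take m).findIdx? p = some i := by
  obtain ⟨hlt, hp, hmin⟩ := List.findIdx?_eq_some_iff_getElem.mp hf
  apply List.findIdx?_eq_some_iff_getElem.mpr
  have hlen : i < (l.take m).length := by simp [List.length_take]; omega
  refine ⟨hlen, ?_, ?_⟩
  · rw [List.getElem_take]; exact hp
  · intro j hj
    rw [List.getElem_take]
    exact hmin j hj

theorem pvLoopA_eq_pvLoopC
    (d mstk : Int) (n : Nat) (hmstk : 1 ≤ mstk) (m : Nat)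
    (hmdef : m = min mstk.toNat n) :
    ∀ (fs : List (Int × Int)) (idx : Int) (stks : List (List (Int × Int))) (c : Nat),
      stks.length = mstk.toNat →
      (c : Int) ≤ idx →
      idx + fs.length = (n : Int) →
      c ≤ mstk.toNat →
      (∀ j (h1 : j < stks.length), j < c → stks[j] ≠ []) →
      (∀ j (h1 : j < stks.length), c ≤ j → stks[j] = []) →
      pvLoopA d mstk fs idx stks = pvLoopC (max d 0) m fs ((stks.take m).map pvKeyOf) := by
  intro fs
  induction fs with
  | nil => intro idx stks c _ _ _ _ _ _; rfl
  | cons fe fs ih =>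
    obtain ⟨s, e⟩ := fe
    intro idx stks c hlen hcidx hcount hcM hne hemp
    have hM1 : 1 ≤ mstk.toNat := by omega
    have hcn : c < n := by
      simp only [List.length_cons] at hcount
      omega
    have hcm : c ≤ m := by omega
    have hm1 : 1 ≤ m := by omega
    have hmle : m ≤ stks.length := by omega
    set p := (fun k => pvKeyLe k (1, s - max d 0)) with hp
    -- a key at an index ≥ c is (0,0), which always admits
    have hPadm : ∀ j (h1 : j < stks.length), c ≤ j → p ((stks.map pvKeyOf)[j]'(by simpa using h1)) = true := by
      intro j h1 hcj
      have hj : stks[j] = [] := hemp j h1 hcj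
      simp [hp, hj, pvKeyOf, pvKeyLe]
    cases hF : (stks.map pvKeyOf).findIdx? p with
    | some i =>
      obtain ⟨hilt, hpi, hmin⟩ := List.findIdx?_eq_some_iff_getElem.mp hF
      rw [List.length_map] at hilt
      -- i < m
      have him : i < m := by
        by_cases hcL : c < stks.length
        · have hic : i ≤ c := by
            by_contra hic
            exact (hmin c (by omega)) (hPadm c hcL (le_refl c))
          omega
        · have : m = mstk.toNat := by omega
          omega
      have hkeys : List.findIdx? p ((stks.take m).map pvKeyOf) = some i := by
        rw [List.map_take]
        exact pvFindIdx?_take p _ i m hF him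
      simp only [pvLoopA, pvLoopC, pvTryPlaceA_eq, ← hp, hF, Option.map_some, hkeys,
        Option.getD_some]
      have hstep : ((stks.modify i (fun st => st ++ [(s, e)])).take m).map pvKeyOf =
          (((stks.take m).map pvKeyOf).set i (1, e)) := by
        rw [List.take_modify, List.modify_eq_set]
        have hgi : (stks.take m)[i]?.getD default = stks[i]'(by omega) := by
          rw [List.getElem?_eq_getElem (by simp [List.length_take]; omega)]
          simp [List.getElem_take]
        rw [hgi, List.map_set, pvKeyOf_append]
      refine List.cons_eq_cons.mpr ⟨rfl, ?_⟩
      rw [← hstep]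
      -- re-establish the invariant
      by_cases hieqc : i = c
      · subst hieqc
        apply ih (idx + 1) _ (i + 1)
        · simp [hlen]
        · push_cast; omega
        · simp only [List.length_cons] at hcount; push_cast at hcount ⊢; omega
        · omega
        · intro j h1 hj
          simp only [List.length_modify] at h1
          rw [List.getElem_modify]
          split
          · rename_i hij; simp
          · rename_i hij
            exact hne j h1 (by omega)
        · intro j h1 hj
          simp only [List.length_modify] at h1
          rw [List.getElem_modify, if_neg (by omega)]
          exact hemp j h1 (by omega)
      · -- i < c
        have hic : i < c := by
          by_cases hcL : c < stks.length
          · have : i ≤ c := by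
              by_contra hic2
              exact (hmin c (by omega)) (hPadm c hcL (le_refl c))
            omega
          · omega
        apply ih (idx + 1) _ c
        · simp [hlen]
        · push_cast; omega
        · simp only [List.length_cons] at hcount; push_cast at hcount ⊢; omega
        · omega
        · intro j h1 hj
          simp only [List.length_modify] at h1
          rw [List.getElem_modify]
          split
          · rename_i hij; simp
          · exact hne j h1 hj
        · intro j h1 hj
          simp only [List.length_modify] at h1
          rw [List.getElem_modify, if_neg (by omega)]
          exact hemp j h1 hj
    | none =>
      -- no stack admits: every stack is nonempty, so c = stks.length = mstk.toNat
      have hall := List.findIdx?_eq_none_iff.mp hF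
      have hcfull : stks.length ≤ c := by
        by_contra hcL
        push_neg at hcL
        have hmem : (stks.map pvKeyOf)[c]'(by simpa using hcL) ∈ stks.map pvKeyOf :=
          List.getElem_mem _
        have := hall _ hmem
        rw [hPadm c hcL (le_refl c)] at this
        exact absurd this (by simp)
      have hceq : c = mstk.toNat := by omega
      have hmeq : m = mstk.toNat := by omega
      have hidxge : (mstk : Int) ≤ idx := by
        have : ((mstk.toNat : Int)) = mstk := Int.toNat_of_nonneg (by omega)
        omega
      have hpyidx : PySem.List.pyIdx? stks.length (min (mstk - 1) idx) = some (mstk.toNat - 1) := by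
        rw [show min (mstk - 1) idx = mstk - 1 by omega]
        simp only [PySem.List.pyIdx?, hlen]
        rw [if_pos (by omega), if_pos (by push_cast; omega)]
        congr 1
        omega
      have hkeysnone : List.findIdx? p ((stks.take m).map pvKeyOf) = none := by
        rw [List.map_take, List.findIdx?_eq_none_iff]
        intro x hx
        exact hall x (List.mem_of_mem_take hx)
      simp only [pvLoopA, pvLoopC, pvTryPlaceA_eq, ← hp, hF, Option.map_none, hpyidx,
        hkeysnone, Option.getD_none]
      have hheads : min (mstk - 1) idx = ((m - 1 : Nat) : Int) := by omega
      refine List.cons_eq_cons.mpr ⟨hheads, ?_⟩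
      · have hi1 : mstk.toNat - 1 = m - 1 := by omega
        have hstep : ((stks.modify (mstk.toNat - 1) (fun st => st ++ [(s, e)])).take m).map pvKeyOf =
            (((stks.take m).map pvKeyOf).set (m - 1) (1, e)) := by
          rw [List.take_modify, List.modify_eq_set]
          have hgi : (stks.take m)[mstk.toNat - 1]?.getD default = stks[mstk.toNat - 1]'(by omega) := by
            rw [List.getElem?_eq_getElem (by simp [List.length_take]; omega)]
            simp [List.getElem_take]
          rw [hgi, List.map_set, pvKeyOf_append, hi1]
        rw [← hstep]
        apply ih (idx + 1) _ c
        · simp [hlen]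
        · push_cast; omega
        · simp only [List.length_cons] at hcount; push_cast at hcount ⊢; omega
        · omega
        · intro j h1 hj
          simp only [List.length_modify] at h1
          rw [List.getElem_modify]
          split
          · rename_i hij; simp
          · exact hne j h1 hj
        · intro j h1 hj
          simp only [List.length_modify] at h1
          exact absurd hj (by omega)

-- ===== VERDICT (by name: the statement is the Claim_ definition above) =====
theorem assign_bed_stacks_spec : Claim_equal_assign_bed_stacks := by
  intro feature_spans min_distance max_stack _hdom hpre
  unfold Spec_assign_bed_stacks
  by_cases hnil : feature_spans = []
  · simp [assign_bed_stacks, assign_bed_stacks_alt, hnil]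
  · have hn : 0 < feature_spans.length := List.length_pos_of_ne_nil hnil
    have hmstk : 1 ≤ max_stack.getD (feature_spans.length : Int) := by
      rcases hpre with h | h
      · exact absurd h hnil
      · cases max_stack with
        | none => simp; omega
        | some k => simpa using h
    set n : Nat := feature_spans.length with hn_def
    set mstk : Int := max_stack.getD (n : Int) with hmstk_def
    set m : Nat := (min mstk (n : Int)).toNat with hm_def
    have hmeq : m = min mstk.toNat n := by omega
    have hm1 : 1 ≤ m := by omega
    have hmM : m ≤ mstk.toNat := by omega
    simp only [assign_bed_stacks, assign_bed_stacks_alt, if_neg hnil]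
    rw [pvLoopB_eq_pvLoopC (max min_distance 0) m hm1 feature_spans (pvBuild m)
      (pvBuild_wf m) (by rw [pvBuild_toList m hm1]; simp)]
    rw [pvBuild_toList m hm1]
    rw [pvLoopA_eq_pvLoopC min_distance mstk n hmstk m hmeq feature_spans 0
      (List.replicate mstk.toNat []) 0
      (by simp) (by omega) (by simp [hn_def]) (by omega)
      (by intro j h1 hj; omega)
      (by intro j h1 hj; exact List.getElem_replicate _)]
    congr 1
    rw [List.take_replicate, List.map_replicate]
    congr 1
    omega
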